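-- pv_equiv track=rewrite | github.com/cmdrvl/cmdrvl-xew | src/cmdrvl_xew/markers/m002_extension_refactor.py | _normalize_qnames
-- ===== SOURCE A (Python) =====
-- from typing import Iterable, List, Optional, Sequence, Dict
--
-- def _normalize_qnames(qnames: Iterable[str]) -> List[str]:
--     """Normalize and deduplicate extension QNames deterministically."""
--     seen = set()
--     normalized: List[str] = []
--     for qname in qnames:
--         value = str(qname)
--         if value in seen:
--             continue
--         seen.add(value)
--         normalized.append(value)
--     normalized.sort()
--     return normalized
-- ===== SOURCE B (Python) =====
-- def _normalize_qnames(qnames):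
--     """Sort all stringified qnames, then deduplicate by adjacency in one pass."""
--     values = [str(qname) for qname in qnames]
--     values.sort()
--     result = []
--     prev = None
--     for value in values:
--         if value != prev:
--             result.append(value)
--             prev = value
--     return result
-- ===== Notes on version B (the rewrite author's own statement) =====
-- stated objective: alternative
-- what changed: Replaces the seen-set membership loop followed by a sort with sort-first then a single adjacency pass that keeps each value only when it differs from the previous one (no set, no membership test).
import Mathlib
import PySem

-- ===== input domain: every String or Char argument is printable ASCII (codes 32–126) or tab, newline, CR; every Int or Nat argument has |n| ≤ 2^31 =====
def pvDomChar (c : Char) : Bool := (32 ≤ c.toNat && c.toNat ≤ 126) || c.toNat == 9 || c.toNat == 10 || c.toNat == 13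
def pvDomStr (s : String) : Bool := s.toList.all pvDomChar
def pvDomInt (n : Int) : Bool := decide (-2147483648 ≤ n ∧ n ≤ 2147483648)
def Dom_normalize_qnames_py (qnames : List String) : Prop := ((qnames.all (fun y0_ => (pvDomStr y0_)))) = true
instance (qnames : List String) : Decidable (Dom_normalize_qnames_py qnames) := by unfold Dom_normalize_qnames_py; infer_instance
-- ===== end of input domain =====

-- B replaces A's seen-set membership loop + final sort by sort-first then one adjacency-dedup pass (objective: alternative, same cost).

-- ===== PORT A =====
-- A: seen = set(); normalized = []; for qname: value = str(qname) (identity on str);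
--    if value in seen: continue; seen.add(value); normalized.append(value); normalized.sort().
def normalize_qnames_py (qnames : List String) : List String :=
  let st := qnames.foldl
    (fun (acc : PySem.Set String × List String) qname =>
      if PySem.Set.contains acc.1 qname then acc
      else (acc.1 ++ [qname], acc.2 ++ [qname]))
    (PySem.Set.empty, [])
  PySem.List.sorted st.2 (fun x => x) false

-- ===== PORT B =====
-- B: values = [str(q) for q in qnames] (str is identity on str); values.sort();
--    one pass appending value and updating prev whenever value != prev.
def normalize_qnames_py_alt (qnames : List String) : List String :=
  let values := PySem.List.sorted (qnames.map (fun qname => qname)) (fun x => x) false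
  let st := values.foldl
    (fun (acc : List String × Option String) value =>
      if some value ≠ acc.2 then (acc.1 ++ [value], some value) else acc)
    ([], none)
  st.1

-- ===== PRECONDITION & SPEC =====
def Spec_normalize_qnames_py (qnames : List String) (out : List String) : Prop := out = normalize_qnames_py_alt qnames
instance (qnames : List String) (out : List String) : Decidable (Spec_normalize_qnames_py qnames out) := by unfold Spec_normalize_qnames_py; infer_instance

-- ===== CLAIM (what is proved, stated in full; the proofs are below) =====
def Claim_equal_normalize_qnames_py : Prop := ∀ (qnames : List String), Dom_normalize_qnames_py qnames → Spec_normalize_qnames_py qnames (normalize_qnames_py qnames)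

-- ===== LEMMAS AND PROOFS =====

-- A's loop keeps 'seen' and 'normalized' identical, so both equal Set.update of the start set.
theorem pvA_fold (xs : List String) (s : PySem.Set String) :
    xs.foldl
      (fun (acc : PySem.Set String × List String) qname =>
        if PySem.Set.contains acc.1 qname then acc
        else (acc.1 ++ [qname], acc.2 ++ [qname]))
      (s, s) = (PySem.Set.update s xs, PySem.Set.update s xs) := by
  induction xs generalizing s with
  | nil => rfl
  | cons x t ih =>
    show List.foldl _ (if PySem.Set.contains s x then (s, s) else (s ++ [x], s ++ [x])) t
        = (PySem.Set.update (PySem.Set.add s x) t, PySem.Set.update (PySem.Set.add s x) t)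
    by_cases h : PySem.Set.contains s x = true
    · have hmem : x ∈ s := by
        simpa [PySem.Set.contains_eq_listContains, List.contains_eq_mem] using h
      rw [if_pos h, show PySem.Set.add s x = s from by simp [PySem.Set.add, hmem]]
      exact ih s
    · have hmem : x ∉ s := by
        simpa [PySem.Set.contains_eq_listContains, List.contains_eq_mem] using h
      rw [if_neg h, show PySem.Set.add s x = s ++ [x] from by simp [PySem.Set.add, hmem]]
      exact ih (s ++ [x])

theorem pvA_fold' (xs : List String) :
    xs.foldl
      (fun (acc : PySem.Set String × List String) qname =>
        if PySem.Set.contains acc.1 qname then acc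
        else (acc.1 ++ [qname], acc.2 ++ [qname]))
      (PySem.Set.empty, []) = (PySem.Set.ofList xs, PySem.Set.ofList xs) :=
  pvA_fold xs PySem.Set.empty

-- structural form of B's adjacency pass
def pvAdj : Option String → List String → List String
  | _, [] => []
  | p, v :: t => if some v ≠ p then v :: pvAdj (some v) t else pvAdj p t

theorem pvAdj_cons_eq {v : String} {p : Option String} (t : List String) (h : some v = p) :
    pvAdj p (v :: t) = pvAdj p t := by simp [pvAdj, h]

theorem pvAdj_cons_ne {v : String} {p : Option String} (t : List String) (h : ¬ some v = p) :
    pvAdj p (v :: t) = v :: pvAdj (some v) t := by simp [pvAdj, h]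

theorem pvB_fold (l : List String) (acc : List String) (p : Option String) :
    (l.foldl
      (fun (acc : List String × Option String) value =>
        if some value ≠ acc.2 then (acc.1 ++ [value], some value) else acc)
      (acc, p)).1 = acc ++ pvAdj p l := by
  induction l generalizing acc p with
  | nil => simp [pvAdj]
  | cons v t ih =>
    show (List.foldl _ (if some v ≠ p then (acc ++ [v], some v) else (acc, p)) t).1 = _
    by_cases h : some v = p
    · rw [if_neg (by simp [h]), pvAdj_cons_eq t h]
      exact ih acc p
    · rw [if_pos h, pvAdj_cons_ne t h]
      rw [ih (acc ++ [v]) (some v), List.append_assoc]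
      rfl

theorem pvAdj_mem (l : List String) (p : Option String)
    (hs : l.Pairwise (· ≤ ·)) (hp : ∀ a, p = some a → ∀ y ∈ l, a ≤ y) (x : String) :
    x ∈ pvAdj p l ↔ x ∈ l ∧ some x ≠ p := by
  induction l generalizing p with
  | nil => simp [pvAdj]
  | cons v t ih =>
    rcases List.pairwise_cons.mp hs with ⟨hv, ht⟩
    by_cases h : some v = p
    · rw [pvAdj_cons_eq t h,
        ih p ht (fun a ha y hy => by cases Option.some.inj (h.trans ha); exact hv y hy)]
      constructor
      · rintro ⟨hxt, hxp⟩
        exact ⟨List.mem_cons_of_mem _ hxt, hxp⟩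
      · rintro ⟨hx, hxp⟩
        rcases List.mem_cons.mp hx with rfl | hxt
        · exact absurd h hxp
        · exact ⟨hxt, hxp⟩
    · rw [pvAdj_cons_ne t h, List.mem_cons,
        ih (some v) ht (fun a ha y hy => by cases Option.some.inj ha; exact hv y hy)]
      constructor
      · rintro (rfl | ⟨hxt, hxv⟩)
        · exact ⟨List.mem_cons_self, h⟩
        · refine ⟨List.mem_cons_of_mem _ hxt, ?_⟩
          intro hxp
          rcases p with _ | a
          · simp at hxp
          · have hxa : x = a := Option.some.inj hxp
            have hav : a ≤ v := hp a rfl v List.mem_cons_self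
            have hva : v ≤ a := hxa ▸ hv x hxt
            exact h (congrArg some (le_antisymm hva hav))
      · rintro ⟨hx, hxp⟩
        rcases List.mem_cons.mp hx with rfl | hxt
        · exact Or.inl rfl
        · by_cases hxv : x = v
          · exact Or.inl hxv
          · exact Or.inr ⟨hxt, fun hc => hxv (Option.some.inj hc)⟩

theorem pvAdj_pairwise (l : List String) (p : Option String)
    (hs : l.Pairwise (· ≤ ·)) (hp : ∀ a, p = some a → ∀ y ∈ l, a ≤ y) :
    (pvAdj p l).Pairwise (· < ·) := by
  induction l generalizing p with
  | nil => simp [pvAdj]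
  | cons v t ih =>
    rcases List.pairwise_cons.mp hs with ⟨hv, ht⟩
    by_cases h : some v = p
    · rw [pvAdj_cons_eq t h]
      exact ih p (by exact ht) (fun a ha y hy => by cases Option.some.inj (h.trans ha); exact hv y hy)
    · rw [pvAdj_cons_ne t h]
      have hp' : ∀ a, some v = some a → ∀ y ∈ t, a ≤ y :=
        fun a ha y hy => by cases Option.some.inj ha; exact hv y hy
      refine List.pairwise_cons.mpr ⟨?_, ih (some v) ht hp'⟩
      intro y hy
      have hmem := (pvAdj_mem t (some v) ht hp' y).mp hy
      exact lt_of_le_of_ne (hv y hmem.1) (fun hvy => hmem.2 (congrArg some hvy).symm)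

-- ===== VERDICT (by name: the statement is the Claim_ definition above) =====
theorem normalize_qnames_py_spec : Claim_equal_normalize_qnames_py := by
  intro qnames _
  unfold Spec_normalize_qnames_py normalize_qnames_py normalize_qnames_py_alt
  simp only
  rw [pvA_fold' qnames, pvB_fold]
  have hmapid : qnames.map (fun qname => qname) = qnames := List.map_id' qnames
  rw [hmapid, List.nil_append]
  set s := PySem.List.sorted qnames (fun x => x) false with hsdef
  have hsp : s.Pairwise (· ≤ ·) := PySem.List.sorted_pairwise qnames (fun x => x)
  have hnone : ∀ a : String, (none : Option String) = some a → ∀ y ∈ s, a ≤ y := by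
    intro a ha y hy; simp at ha
  have hlt : (pvAdj none s).Pairwise (· < ·) := pvAdj_pairwise s none hsp hnone
  have hmem : ∀ x, x ∈ pvAdj none s ↔ x ∈ qnames := by
    intro x
    rw [pvAdj_mem s none hsp hnone x, hsdef]
    simp [PySem.List.mem_sorted]
  have hnodup : (pvAdj none s).Nodup := hlt.imp (fun h => ne_of_lt h)
  have hperm : (pvAdj none s).Perm (PySem.Set.ofList qnames) := by
    rw [List.perm_ext_iff_of_nodup hnodup (PySem.Set.nodup_ofList qnames)]
    intro x
    rw [hmem x, PySem.Set.mem_ofList]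
  exact PySem.List.sorted_eq_of_perm_of_pairwise_lt _ _ _ hperm hlt
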